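-- pv_equiv track=rewrite | github.com/Siddhant77/wardrobe-app | backend/main.py | encode_formality_labels
-- ===== SOURCE A (Python) =====
-- from typing import List, Optional
--
-- def encode_formality_labels(labels: List[str]) -> int:
--     """
--     Encode formality label strings to binary representation.
--     Casual=0b0001, Formal=0b0010, Sports=0b0100, Party=0b1000
--     """
--     formality_map = {
--         'Casual': 0b0001,
--         'Formal': 0b0010,
--         'Sports': 0b0100,
--         'Party': 0b1000,
--     }
--     result = 0
--     for label in labels:
--         if label in formality_map:
--             result |= formality_map[label]
--     return result
-- ===== SOURCE B (Python) =====
-- def encode_formality_labels(labels):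
--     """
--     Encode formality label strings to binary representation.
--     Casual=0b0001, Formal=0b0010, Sports=0b0100, Party=0b1000
--     """
--     return (('Casual' in labels) * 1
--             + ('Formal' in labels) * 2
--             + ('Sports' in labels) * 4
--             + ('Party' in labels) * 8)
-- ===== Notes on version B (the rewrite author's own statement) =====
-- stated objective: simpler
-- what changed: B replaces A's loop-and-dict accumulation with a loop-free closed form: a weighted sum of four membership tests (the bits are disjoint so OR equals addition).
import Mathlib
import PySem

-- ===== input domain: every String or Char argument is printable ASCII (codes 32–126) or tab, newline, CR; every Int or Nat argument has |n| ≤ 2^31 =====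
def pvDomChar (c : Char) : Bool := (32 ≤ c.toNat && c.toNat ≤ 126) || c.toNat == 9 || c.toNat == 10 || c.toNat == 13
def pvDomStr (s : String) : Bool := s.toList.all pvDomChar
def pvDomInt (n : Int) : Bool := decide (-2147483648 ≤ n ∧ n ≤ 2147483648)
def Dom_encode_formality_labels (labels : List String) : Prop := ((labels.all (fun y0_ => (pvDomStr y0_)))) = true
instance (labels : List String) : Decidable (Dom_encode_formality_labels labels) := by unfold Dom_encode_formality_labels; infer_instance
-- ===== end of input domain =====

-- B replaces A's loop-and-dict accumulation with a loop-free weighted sum of four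
-- membership tests (the bits are disjoint, so OR equals addition); objective: simpler.

-- ===== PORT A =====
def encode_formality_labels (labels : List String) : Int :=
  let formality_map : PySem.Dict String Int :=
    PySem.Dict.ofList [("Casual", 1), ("Formal", 2), ("Sports", 4), ("Party", 8)]
  labels.foldl
    (fun result label =>
      if formality_map.contains label then PySem.Int.bor result (formality_map.getD label 0)
      else result) 0

-- ===== PORT B =====
def encode_formality_labels_alt (labels : List String) : Int :=
  (if "Casual" ∈ labels then 1 else 0) * 1
  + (if "Formal" ∈ labels then 1 else 0) * 2
  + (if "Sports" ∈ labels then 1 else 0) * 4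
  + (if "Party" ∈ labels then 1 else 0) * 8

-- ===== PRECONDITION & SPEC =====
def Spec_encode_formality_labels (labels : List String) (out : Int) : Prop := out = encode_formality_labels_alt labels
instance (labels : List String) (out : Int) : Decidable (Spec_encode_formality_labels labels out) := by unfold Spec_encode_formality_labels; infer_instance

-- ===== CLAIM (what is proved, stated in full; the proofs are below) =====
def Claim_equal_encode_formality_labels : Prop := ∀ (labels : List String), Dom_encode_formality_labels labels → Spec_encode_formality_labels labels (encode_formality_labels labels)

-- ===== LEMMAS AND PROOFS =====

-- the common value, as a Nat bitmask over plain membership tests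
def pvEN (labels : List String) : Nat :=
  (if "Casual" ∈ labels then 1 else 0) |||
  ((if "Formal" ∈ labels then 2 else 0) |||
   ((if "Sports" ∈ labels then 4 else 0) |||
    (if "Party" ∈ labels then 8 else 0)))

lemma pvAlt_eq (labels : List String) :
    encode_formality_labels_alt labels = ((pvEN labels : Nat) : Int) := by
  by_cases h1 : "Casual" ∈ labels <;>
  by_cases h2 : "Formal" ∈ labels <;>
  by_cases h3 : "Sports" ∈ labels <;>
  by_cases h4 : "Party" ∈ labels <;>
  simp [encode_formality_labels_alt, pvEN, h1, h2, h3, h4]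

lemma pvDictEq : (PySem.Dict.ofList [("Casual", (1:Int)), ("Formal", 2), ("Sports", 4), ("Party", 8)])
    = PySem.Dict.mk [("Casual", 1), ("Formal", 2), ("Sports", 4), ("Party", 8)] := by rfl

lemma pvA_fold (labels : List String) (m : Nat) :
    labels.foldl
      (fun result label =>
        if (PySem.Dict.ofList [("Casual", (1:Int)), ("Formal", 2), ("Sports", 4), ("Party", 8)]).contains label
        then PySem.Int.bor result ((PySem.Dict.ofList [("Casual", (1:Int)), ("Formal", 2), ("Sports", 4), ("Party", 8)]).getD label 0)
        else result) ((m : Nat) : Int) = (((m ||| pvEN labels : Nat)) : Int) := by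
  induction labels generalizing m with
  | nil => simp [pvEN]
  | cons l ls ih =>
    rw [List.foldl_cons]
    by_cases h1 : l = "Casual"
    · subst h1
      rw [if_pos (by rfl), show (PySem.Dict.ofList [("Casual", (1:Int)), ("Formal", 2), ("Sports", 4), ("Party", 8)]).getD "Casual" 0 = ((1:Nat):Int) from rfl,
        PySem.Int.bor_natCast, ih]
      congr 1
      simp only [pvEN, List.mem_cons, true_or, if_true, String.reduceEq, false_or]
      split_ifs <;> rw [Nat.lor_assoc] <;> congr 1
    · by_cases h2 : l = "Formal"
      · subst h2
        rw [if_pos (by rfl), show (PySem.Dict.ofList [("Casual", (1:Int)), ("Formal", 2), ("Sports", 4), ("Party", 8)]).getD "Formal" 0 = ((2:Nat):Int) from rfl,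
          PySem.Int.bor_natCast, ih]
        congr 1
        simp only [pvEN, List.mem_cons, true_or, if_true, String.reduceEq, false_or]
        split_ifs <;> rw [Nat.lor_assoc] <;> congr 1
      · by_cases h3 : l = "Sports"
        · subst h3
          rw [if_pos (by rfl), show (PySem.Dict.ofList [("Casual", (1:Int)), ("Formal", 2), ("Sports", 4), ("Party", 8)]).getD "Sports" 0 = ((4:Nat):Int) from rfl,
            PySem.Int.bor_natCast, ih]
          congr 1
          simp only [pvEN, List.mem_cons, true_or, if_true, String.reduceEq, false_or]
          split_ifs <;> rw [Nat.lor_assoc] <;> congr 1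
        · by_cases h4 : l = "Party"
          · subst h4
            rw [if_pos (by rfl), show (PySem.Dict.ofList [("Casual", (1:Int)), ("Formal", 2), ("Sports", 4), ("Party", 8)]).getD "Party" 0 = ((8:Nat):Int) from rfl,
              PySem.Int.bor_natCast, ih]
            congr 1
            simp only [pvEN, List.mem_cons, true_or, if_true, String.reduceEq, false_or]
            split_ifs <;> rw [Nat.lor_assoc] <;> congr 1
          · rw [if_neg (by rw [pvDictEq]; simp [PySem.Dict.contains_mk]; exact ⟨fun h => h1 (Eq.symm h), fun h => h2 (Eq.symm h), fun h => h3 (Eq.symm h), fun h => h4 (Eq.symm h)⟩), ih]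
            congr 1
            simp only [pvEN, List.mem_cons]
            have e1 : ("Casual" = l) = False := eq_false (fun h => h1 (Eq.symm h))
            have e2 : ("Formal" = l) = False := eq_false (fun h => h2 (Eq.symm h))
            have e3 : ("Sports" = l) = False := eq_false (fun h => h3 (Eq.symm h))
            have e4 : ("Party" = l) = False := eq_false (fun h => h4 (Eq.symm h))
            simp only [e1, e2, e3, e4, false_or]

-- ===== VERDICT (by name: the statement is the Claim_ definition above) =====
theorem encode_formality_labels_spec : Claim_equal_encode_formality_labels := by
  intro labels _
  unfold Spec_encode_formality_labels encode_formality_labels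
  rw [pvAlt_eq]
  have := pvA_fold labels 0
  simpa using this
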